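-- pv_equiv track=rewrite | github.com/Malinon/crystgrowthfunctions | src/crystgrowthpoly/private.py | get_alternative_sum
-- ===== SOURCE A (Python) =====
-- def get_alternative_sum(coefficient_lists):
--     length_of_lists = len(coefficient_lists[0]) # Number of single polynomial's coefficients
--     return_list = list()
--     for i in range(length_of_lists):
--         acc = 0
--         for j  in range(len(coefficient_lists)):
--             acc = acc + coefficient_lists[j][i] * ((-1) ** (j % 2))
--         return_list.append(acc)
--     return return_list
-- ===== SOURCE B (Python) =====
-- def get_alternative_sum(coefficient_lists):
--     width = len(coefficient_lists[0])  # Number of single polynomial's coefficients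
--     plus = [0] * width
--     minus = [0] * width
--     for idx, row in enumerate(coefficient_lists):
--         if idx % 2 == 0:
--             plus = [p + row[i] for i, p in enumerate(plus)]
--         else:
--             minus = [m + row[i] for i, m in enumerate(minus)]
--     return [p - m for p, m in zip(plus, minus)]
-- ===== Notes on version B (the rewrite author's own statement) =====
-- stated objective: alternative
-- what changed: A loops over columns with an inner signed scan over all rows; B makes a single pass over the rows, accumulating two whole column-sum vectors (even-indexed and odd-indexed rows) via list comprehensions and subtracting them at the end.
import Mathlib
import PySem

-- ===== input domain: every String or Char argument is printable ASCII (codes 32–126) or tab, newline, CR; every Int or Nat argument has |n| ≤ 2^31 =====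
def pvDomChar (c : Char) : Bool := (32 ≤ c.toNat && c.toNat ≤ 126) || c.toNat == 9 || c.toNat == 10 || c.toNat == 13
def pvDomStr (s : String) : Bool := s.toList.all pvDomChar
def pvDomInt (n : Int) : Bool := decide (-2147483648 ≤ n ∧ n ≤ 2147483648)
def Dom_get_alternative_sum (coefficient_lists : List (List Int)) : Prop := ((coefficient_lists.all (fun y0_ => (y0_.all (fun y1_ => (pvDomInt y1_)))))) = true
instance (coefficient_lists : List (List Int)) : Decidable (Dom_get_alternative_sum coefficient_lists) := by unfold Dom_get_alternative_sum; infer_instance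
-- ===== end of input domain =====

-- B replaces A's column-outer/row-inner signed scan by a single pass over the rows that accumulates two column-sum vectors (even- and odd-indexed rows) and subtracts them at the end; same cost, different decomposition.


-- ===== PORT A =====
-- literal port of A: outer loop over column indices, inner signed scan over row indices
def get_alternative_sum (coefficient_lists : List (List Int)) : List Int :=
  let length_of_lists := (PySem.List.pyGetD coefficient_lists 0 []).length
  (PySem.List.pyRange 0 (length_of_lists : Int) 1).foldl
    (fun return_list i =>
      let acc := (PySem.List.pyRange 0 (coefficient_lists.length : Int) 1).foldl
        (fun acc j =>
          acc + PySem.List.pyGetD (PySem.List.pyGetD coefficient_lists j []) i 0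
                  * ((-1 : Int) ^ (PySem.Int.mod j 2).toNat) ) 0
      return_list ++ [acc]) []

-- ===== PORT B =====
-- literal port of B: one pass over the rows accumulating two column-sum vectors
def get_alternative_sum_alt (coefficient_lists : List (List Int)) : List Int :=
  let width := (PySem.List.pyGetD coefficient_lists 0 []).length
  let pm := (PySem.List.enumerate coefficient_lists 0).foldl
    (fun (pm : List Int × List Int) ir =>
      if PySem.Int.mod ir.1 2 == 0 then
        ((PySem.List.enumerate pm.1 0).map (fun ip => ip.2 + PySem.List.pyGetD ir.2 ip.1 0), pm.2)
      else
        (pm.1, (PySem.List.enumerate pm.2 0).map (fun im => im.2 + PySem.List.pyGetD ir.2 im.1 0)))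
    (List.replicate width (0 : Int), List.replicate width (0 : Int))
  (pm.1.zip pm.2).map (fun q => q.1 - q.2)

-- ===== PRECONDITION & SPEC =====
-- Pre_ excludes exactly the inputs where the Python A raises IndexError: the empty outer list
-- (coefficient_lists[0]) and inputs where some row is shorter than the first row.
def Pre_get_alternative_sum (coefficient_lists : List (List Int)) : Prop :=
  coefficient_lists ≠ [] ∧
  ∀ row ∈ coefficient_lists, (coefficient_lists.headD []).length ≤ row.length
instance (coefficient_lists : List (List Int)) : Decidable (Pre_get_alternative_sum coefficient_lists) := by
  unfold Pre_get_alternative_sum; infer_instance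
def pvWitness_get_alternative_sum : List (List Int) := [[1, 2], [3, 4], [5, 6]]
def Spec_get_alternative_sum (coefficient_lists : List (List Int)) (out : List Int) : Prop := out = get_alternative_sum_alt coefficient_lists
instance (coefficient_lists : List (List Int)) (out : List Int) : Decidable (Spec_get_alternative_sum coefficient_lists out) := by unfold Spec_get_alternative_sum; infer_instance

-- ===== CLAIM (what is proved, stated in full; the proofs are below) =====
def Claim_equal_get_alternative_sum : Prop := ∀ (coefficient_lists : List (List Int)), Dom_get_alternative_sum coefficient_lists → Pre_get_alternative_sum coefficient_lists → Spec_get_alternative_sum coefficient_lists (get_alternative_sum coefficient_lists)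

-- ===== LEMMAS AND PROOFS =====

-- the alternating column sum both programs compute at column i
def altCol : List (List Int) → Int → Int
  | [], _ => 0
  | r :: rs, i => PySem.List.pyGetD r i 0 - altCol rs i

theorem sum_map_neg_int (l : List Nat) (f : Nat → Int) :
    (l.map (fun k => - f k)).sum = - (l.map f).sum := by
  induction l with
  | nil => simp
  | cons a t ih => simp [ih]; ring

theorem sign_natCast (k : Nat) :
    ((-1 : Int)) ^ (PySem.Int.mod (k : Int) 2).toNat = (if k % 2 = 0 then (1 : Int) else -1) := by
  have h : PySem.Int.mod (k : Int) 2 = ((k % 2 : Nat) : Int) := by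
    simp [PySem.Int.mod, Int.fmod_eq_emod]
  rw [h]
  rcases Nat.even_or_odd k with hk | hk
  · have : k % 2 = 0 := Nat.even_iff.mp hk
    simp [this]
  · have : k % 2 = 1 := Nat.odd_iff.mp hk
    simp [this]

theorem sum_col (rows : List (List Int)) (i : Int) :
    ((List.range rows.length).map (fun (k : Nat) =>
        PySem.List.pyGetD (PySem.List.pyGetD rows (k : Int) []) i 0
          * ((-1 : Int) ^ (PySem.Int.mod (k : Int) 2).toNat))).sum = altCol rows i := by
  induction rows with
  | nil => simp [altCol]
  | cons r rs ih =>
    rw [List.length_cons, List.range_succ_eq_map, List.map_cons, List.map_map, List.sum_cons]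
    have hmap : (List.range rs.length).map ((fun k : Nat =>
          PySem.List.pyGetD (PySem.List.pyGetD (r :: rs) (k : Int) []) i 0
            * ((-1 : Int) ^ (PySem.Int.mod (k : Int) 2).toNat)) ∘ Nat.succ)
        = (List.range rs.length).map (fun k : Nat =>
          - (PySem.List.pyGetD (PySem.List.pyGetD rs (k : Int) []) i 0
            * ((-1 : Int) ^ (PySem.Int.mod (k : Int) 2).toNat))) := by
      apply List.map_congr_left
      intro k _
      simp only [Function.comp, sign_natCast]
      have h2 : PySem.List.pyGetD (r :: rs) ((k.succ : Nat) : Int) [] = PySem.List.pyGetD rs (k : Int) [] := by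
        rw [PySem.List.pyGetD_natCast, PySem.List.pyGetD_natCast]
        simp [List.getD]
      rw [h2]
      have h3 : (k.succ) % 2 = 0 ↔ ¬ (k % 2 = 0) := by omega
      by_cases hk : k % 2 = 0 <;> simp [hk, h3]
    rw [hmap, sum_map_neg_int, ih]
    simp [altCol]
    ring

theorem colA (rows : List (List Int)) (i : Int) :
    (PySem.List.pyRange 0 (rows.length : Int) 1).foldl
      (fun acc j => acc + PySem.List.pyGetD (PySem.List.pyGetD rows j []) i 0
          * ((-1 : Int) ^ (PySem.Int.mod j 2).toNat)) 0 = altCol rows i := by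
  rw [PySem.List.foldl_add, PySem.List.pyRange_one, List.map_map]
  refine Eq.trans ?_ (sum_col rows i)
  rw [zero_add]
  have hn : (((rows.length : Int)) - 0).toNat = rows.length := by simp
  rw [hn]
  congr 1
  apply List.map_congr_left
  intro k _
  simp [Function.comp]

theorem addRow_getD (p row : List Int) (k : Nat) (hk : k < p.length) :
    ((PySem.List.enumerate p 0).map (fun ip => ip.2 + PySem.List.pyGetD row ip.1 0)).getD k 0
      = p.getD k 0 + PySem.List.pyGetD row (k : Int) 0 := by
  have hlen : k < ((PySem.List.enumerate p 0).map (fun ip => ip.2 + PySem.List.pyGetD row ip.1 0)).length := by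
    simp [PySem.List.length_enumerate, hk]
  rw [List.getD_eq_getElem _ _ hlen, List.getElem_map, PySem.List.getElem_enumerate,
      List.getD_eq_getElem _ _ hk]
  simp

theorem mod2_beq (s : Nat) :
    (PySem.Int.mod (s : Int) 2 == 0) = decide (s % 2 = 0) := by
  have h : PySem.Int.mod (s : Int) 2 = ((s % 2 : Nat) : Int) := by
    simp [PySem.Int.mod, Int.fmod_eq_emod]
  rw [h]
  rcases Nat.even_or_odd s with hs | hs
  · have : s % 2 = 0 := Nat.even_iff.mp hs
    simp [this]
  · have : s % 2 = 1 := Nat.odd_iff.mp hs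
    simp [this]

theorem foldB_inv (rows : List (List Int)) (s : Nat) (p m : List Int) :
    (fun res : List Int × List Int =>
      res.1.length = p.length ∧ res.2.length = m.length ∧
      ∀ k : Nat, k < p.length → k < m.length →
        res.1.getD k 0 - res.2.getD k 0
          = p.getD k 0 - m.getD k 0
            + (if s % 2 = 0 then altCol rows (k : Int) else - altCol rows (k : Int)))
    ((PySem.List.enumerate rows (s : Int)).foldl
      (fun (pm : List Int × List Int) ir =>
        if PySem.Int.mod ir.1 2 == 0 then
          ((PySem.List.enumerate pm.1 0).map (fun ip => ip.2 + PySem.List.pyGetD ir.2 ip.1 0), pm.2)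
        else
          (pm.1, (PySem.List.enumerate pm.2 0).map (fun im => im.2 + PySem.List.pyGetD ir.2 im.1 0)))
      (p, m)) := by
  induction rows generalizing s p m with
  | nil =>
    simp [PySem.List.enumerate_nil, altCol]
  | cons r rs ih =>
    rw [PySem.List.enumerate_cons, List.foldl_cons]
    have hc : ((s : Int) + 1) = (((s + 1 : Nat)) : Int) := by push_cast; ring
    by_cases hs : s % 2 = 0
    · simp only [mod2_beq s, hs, decide_true, if_true]
      rw [hc]
      obtain ⟨h1, h2, h3⟩ := ih (s + 1) ((PySem.List.enumerate p 0).map (fun ip => ip.2 + PySem.List.pyGetD r ip.1 0)) m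
      have hlen : ((PySem.List.enumerate p 0).map (fun ip => ip.2 + PySem.List.pyGetD r ip.1 0)).length = p.length := by
        simp [PySem.List.length_enumerate]
      refine ⟨by rw [h1, hlen], h2, ?_⟩
      intro k hkp hkm
      have hk1 : k < ((PySem.List.enumerate p 0).map (fun ip => ip.2 + PySem.List.pyGetD r ip.1 0)).length := by
        rw [hlen]; exact hkp
      have H := h3 k hk1 hkm
      rw [addRow_getD p r k hkp] at H
      rw [H]
      have hs1 : ¬ ((s + 1) % 2 = 0) := by omega
      simp [hs1, altCol]
      ring
    · simp only [mod2_beq s, hs, decide_false, if_false, Bool.false_eq_true]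
      rw [hc]
      obtain ⟨h1, h2, h3⟩ := ih (s + 1) p ((PySem.List.enumerate m 0).map (fun im => im.2 + PySem.List.pyGetD r im.1 0))
      have hlen : ((PySem.List.enumerate m 0).map (fun im => im.2 + PySem.List.pyGetD r im.1 0)).length = m.length := by
        simp [PySem.List.length_enumerate]
      refine ⟨h1, by rw [h2, hlen], ?_⟩
      intro k hkp hkm
      have hk1 : k < ((PySem.List.enumerate m 0).map (fun im => im.2 + PySem.List.pyGetD r im.1 0)).length := by
        rw [hlen]; exact hkm
      have H := h3 k hkp hk1
      rw [addRow_getD m r k hkm] at H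
      rw [H]
      have hs1 : (s + 1) % 2 = 0 := by omega
      simp [hs1, altCol]
      ring

theorem ports_agree (cl : List (List Int)) :
    get_alternative_sum cl = get_alternative_sum_alt cl := by
  unfold get_alternative_sum get_alternative_sum_alt
  simp only []
  set n := (PySem.List.pyGetD cl 0 []).length with hn
  -- A side: foldl-append is a map; each column is altCol
  rw [PySem.List.foldl_append_singleton_eq_map, List.nil_append]
  -- B side invariant at s = 0
  have hz : ((0 : Nat) : Int) = (0 : Int) := rfl
  have H := foldB_inv cl 0 (List.replicate n (0 : Int)) (List.replicate n (0 : Int))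
  rw [hz] at H
  obtain ⟨h1, h2, h3⟩ := H
  apply List.ext_getElem
  · rw [List.length_map, PySem.List.length_pyRange_one, List.length_map, List.length_zip, h1, h2]
    simp
  · intro k hk1 hk2
    rw [List.getElem_map, PySem.List.getElem_pyRange_one, List.getElem_map, List.getElem_zip]
    have hkn : k < n := by
      simpa [PySem.List.length_pyRange_one] using hk1
    rw [colA]
    have hp : k < (List.replicate n (0 : Int)).length := by simpa using hkn
    have Hk := h3 k hp hp
    rw [← List.getD_eq_getElem, ← List.getD_eq_getElem, Hk]
    simp

-- ===== VERDICT (by name: the statement is the Claim_ definition above) =====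
theorem get_alternative_sum_spec : Claim_equal_get_alternative_sum := by
  intro cl _ _
  unfold Spec_get_alternative_sum
  exact ports_agree cl
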